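-- pv_equiv track=rewrite | github.com/MarShaikh/epi-geo-chat | code_samples/statistics/zonal_summary.py | get_raster_asset
-- ===== SOURCE A (Python) =====
-- def get_raster_asset(assets):
--     """Find the first renderable raster asset from an item's assets dict."""
--     RASTER_TYPES = {
--         "image/tiff",
--         "image/tiff; application=geotiff",
--         "image/vnd.stac.geotiff",
--         "application/x-geotiff",
--     }
--     for key, info in assets.items():
--         if info.get("type", "") in RASTER_TYPES:
--             return info["href"]
--     for key, info in assets.items():
--         href = info.get("href", "")
--         if href and not href.endswith((".xml", ".json")):
--             return href
--     return None
-- ===== SOURCE B (Python) =====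
-- def get_raster_asset(assets):
--     """Find the first renderable raster asset from an item's assets dict.
--
--     Single pass: a type match returns immediately; otherwise the first
--     acceptable href is remembered as a fallback and returned at the end.
--     """
--     RASTER_TYPES = {
--         "image/tiff",
--         "image/tiff; application=geotiff",
--         "image/vnd.stac.geotiff",
--         "application/x-geotiff",
--     }
--     fallback = None
--     for info in assets.values():
--         if info.get("type", "") in RASTER_TYPES:
--             return info["href"]
--         if fallback is None:
--             href = info.get("href", "")
--             if href and not href.endswith((".xml", ".json")):
--                 fallback = href
--     return fallback
-- ===== Notes on version B (the rewrite author's own statement) =====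
-- stated objective: simpler
-- what changed: The two sequential scans over the assets dict are collapsed into one pass that returns immediately on a raster-type match and otherwise remembers the first acceptable href as a fallback returned after the loop.
import Mathlib
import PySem

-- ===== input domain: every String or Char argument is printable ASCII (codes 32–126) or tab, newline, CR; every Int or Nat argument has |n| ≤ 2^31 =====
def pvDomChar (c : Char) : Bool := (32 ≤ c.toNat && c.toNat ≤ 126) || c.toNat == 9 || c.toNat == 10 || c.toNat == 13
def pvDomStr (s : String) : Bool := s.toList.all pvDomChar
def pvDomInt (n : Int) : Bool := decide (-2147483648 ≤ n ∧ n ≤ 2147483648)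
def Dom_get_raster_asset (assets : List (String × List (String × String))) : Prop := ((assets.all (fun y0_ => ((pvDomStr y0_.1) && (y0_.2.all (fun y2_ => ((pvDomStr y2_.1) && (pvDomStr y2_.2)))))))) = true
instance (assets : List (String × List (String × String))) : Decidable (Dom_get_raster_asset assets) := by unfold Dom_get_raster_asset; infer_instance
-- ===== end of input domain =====

-- B collapses A's two scans into one pass with a single fallback candidate; equivalence of return values.

-- ===== PORT A =====
def pvRasterTypes : List String :=
  ["image/tiff", "image/tiff; application=geotiff", "image/vnd.stac.geotiff", "application/x-geotiff"]

-- info.get("type", "")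
def pvTypeOf (info : List (String × String)) : String := (PySem.Dict.mk info).getD "type" ""

-- first loop of A: at the first type match, 'some (info["href"])' (inner none = KeyError, excluded by Pre_)
def pvScan1 : List (String × List (String × String)) → Option (Option String)
  | [] => none
  | (_, info) :: rest =>
    if pvTypeOf info ∈ pvRasterTypes then some ((PySem.Dict.mk info).get? "href")
    else pvScan1 rest

-- second loop of A: first truthy href not ending in ".xml"/".json"
def pvScan2 : List (String × List (String × String)) → Option String
  | [] => none
  | (_, info) :: rest =>
    let href := (PySem.Dict.mk info).getD "href" ""
    if href ≠ "" ∧ PySem.Str.endswith href ".xml" = false ∧ PySem.Str.endswith href ".json" = false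
    then some href else pvScan2 rest

def get_raster_asset (assets : List (String × List (String × String))) : Option String :=
  match pvScan1 assets with
  | some o => o
  | none => pvScan2 assets

-- ===== PORT B =====
-- single pass with a fallback accumulator (B's loop)
def pvGoB (fb : Option String) : List (String × List (String × String)) → Option String
  | [] => fb
  | (_, info) :: rest =>
    if pvTypeOf info ∈ pvRasterTypes then (PySem.Dict.mk info).get? "href"
    else
      pvGoB
        (match fb with
         | some h => some h
         | none =>
           let href := (PySem.Dict.mk info).getD "href" ""
           if href ≠ "" ∧ PySem.Str.endswith href ".xml" = false ∧ PySem.Str.endswith href ".json" = false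
           then some href else none)
        rest

def get_raster_asset_alt (assets : List (String × List (String × String))) : Option String :=
  pvGoB none assets

-- ===== PRECONDITION & SPEC =====
-- Pre_ excludes exactly the inputs where A raises KeyError: the first asset whose type is a
-- raster type has no "href" key (B raises there too; the ports return none there, outside the claim).
def Pre_get_raster_asset (assets : List (String × List (String × String))) : Prop :=
  ((assets.find? (fun p => decide (pvTypeOf p.2 ∈ pvRasterTypes))).all
    (fun p => ((PySem.Dict.mk p.2).get? "href").isSome)) = true

instance (assets : List (String × List (String × String))) : Decidable (Pre_get_raster_asset assets) := by
  unfold Pre_get_raster_asset; infer_instance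

def pvWitness_get_raster_asset : (List (String × List (String × String))) :=
  [("a", [("type", "image/tiff"), ("href", "h.tif")]), ("b", [("href", "doc.xml")])]

def Spec_get_raster_asset (assets : List (String × List (String × String))) (out : Option String) : Prop := out = get_raster_asset_alt assets
instance (assets : List (String × List (String × String))) (out : Option String) : Decidable (Spec_get_raster_asset assets out) := by unfold Spec_get_raster_asset; infer_instance

-- ===== CLAIM (what is proved, stated in full; the proofs are below) =====
def Claim_equal_get_raster_asset : Prop := ∀ (assets : List (String × List (String × String))), Dom_get_raster_asset assets → Pre_get_raster_asset assets → Spec_get_raster_asset assets (get_raster_asset assets)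

-- ===== LEMMAS AND PROOFS =====

-- B's one-pass loop equals: A's first scan if it fires, else the pending fallback, else A's second scan.
theorem pvGoB_eq (l : List (String × List (String × String))) : ∀ fb : Option String,
    pvGoB fb l = match pvScan1 l with
      | some o => o
      | none => match fb with
        | some h => some h
        | none => pvScan2 l := by
  induction l with
  | nil => intro fb; cases fb <;> rfl
  | cons p rest ih =>
    intro fb
    obtain ⟨k, info⟩ := p
    by_cases ht : pvTypeOf info ∈ pvRasterTypes
    · simp [pvGoB, pvScan1, ht]
    · cases fb with
      | some h => simp [pvGoB, pvScan1, ht, ih]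
      | none =>
        simp only [pvGoB, pvScan1, pvScan2, if_neg ht, ih]
        cases pvScan1 rest
        · by_cases hc : (PySem.Dict.mk info).getD "href" "" ≠ ""
              ∧ PySem.Str.endswith ((PySem.Dict.mk info).getD "href" "") ".xml" = false
              ∧ PySem.Str.endswith ((PySem.Dict.mk info).getD "href" "") ".json" = false
          · rw [if_pos hc, if_pos hc]
          · rw [if_neg hc, if_neg hc]
        · rfl

-- ===== VERDICT (by name: the statement is the Claim_ definition above) =====
theorem get_raster_asset_spec : Claim_equal_get_raster_asset := by
  intro assets _ _
  unfold Spec_get_raster_asset get_raster_asset get_raster_asset_alt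
  rw [pvGoB_eq]
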